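-- pv_equiv track=rewrite | github.com/mctinker/Map-Tasker | maptasker/src/guiutils.py | search_substring_in_list
-- ===== SOURCE A (Python) =====
-- def search_substring_in_list(strings: list, substring: str, stop_on_first_match: bool) -> list:
--     """
--     Searches for a given substring within a list of strings and returns a list of tuples containing the index of the string and the position of the substring.
--
--     Args:
--         strings (list): A list of strings to search within.
--         substring (str): The substring to search for.
--         stop_on_first_match (bool): Whether to stop searching after the first match is found.
--
--     Returns:
--         list: A list of tuples containing the index of the string and the position of the substring.
--     """
--     matches = []
--     lower_substring = substring.lower()
--     for i, string in enumerate(strings):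
--         lower_string = string.lower()
--         start = 0
--         while start < len(lower_string):
--             pos = lower_string.find(lower_substring, start)
--             if pos == -1 or "up one level" in lower_string:
--                 break
--             matches.append((i, pos))
--             if stop_on_first_match:
--                 return matches
--             start = pos + 1  # Move start index forward to continue searching
--     return matches
-- ===== SOURCE B (Python) =====
-- def _match_positions(lower_string: str, lower_substring: str) -> list:
--     if "up one level" in lower_string:
--         return []
--     return [p for p in range(len(lower_string))
--             if lower_string.startswith(lower_substring, p)]
--
--
-- def search_substring_in_list(strings: list, substring: str, stop_on_first_match: bool) -> list:
--     lower_substring = substring.lower()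
--     all_matches = [
--         (i, pos)
--         for i, string in enumerate(strings)
--         for pos in _match_positions(string.lower(), lower_substring)
--     ]
--     return all_matches[:1] if stop_on_first_match else all_matches
-- ===== Notes on version B (the rewrite author's own statement) =====
-- stated objective: alternative
-- what changed: Replaces A's stateful while/find/start=pos+1 loop with early return by a staged declarative pipeline: a comprehension collects all match positions per string (filtering every index with startswith and skipping 'up one level' strings), flattened over enumerate, and stop_on_first_match becomes a final [:1] truncation instead of an in-loop return.
import Mathlib
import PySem

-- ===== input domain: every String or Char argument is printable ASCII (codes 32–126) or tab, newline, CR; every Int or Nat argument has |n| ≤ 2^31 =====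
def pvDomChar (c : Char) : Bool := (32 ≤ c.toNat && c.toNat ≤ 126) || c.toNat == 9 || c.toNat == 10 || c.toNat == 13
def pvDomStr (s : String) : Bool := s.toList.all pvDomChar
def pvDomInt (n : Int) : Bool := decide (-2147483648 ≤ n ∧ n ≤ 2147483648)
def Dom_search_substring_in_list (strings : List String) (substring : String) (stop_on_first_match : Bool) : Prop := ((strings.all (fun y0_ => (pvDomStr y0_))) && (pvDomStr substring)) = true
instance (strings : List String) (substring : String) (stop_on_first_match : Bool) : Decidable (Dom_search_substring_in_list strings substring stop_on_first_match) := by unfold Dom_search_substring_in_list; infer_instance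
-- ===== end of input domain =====

-- B replaces A's stateful while/find/start=pos+1 loop-with-early-return by a staged pipeline:
-- per-string match positions via filter/startswith, flattened over enumerate, then take 1 if stopping.


-- ===== PORT A =====
-- inner `while start < len(lower_string)` loop; fuel = len - start bounds the iterations
-- (start strictly increases each round), making the recursion total without changing the values.
-- Second component: True = the `return matches` inside the loop fired.
def loopA (s lsub : List Char) (i : Nat) (stop : Bool) (start : Nat)
    (acc : List (Int × Int)) (fuel : Nat) : List (Int × Int) × Bool :=
  match fuel with
  | 0 => (acc, false)
  | fuel' + 1 =>
    if start < s.length then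
      let pos := PySem.Chars.findFrom s lsub (start : Int) none
      if pos = -1 ∨ PySem.Chars.isIn "up one level".toList s then (acc, false)
      else
        let acc' := acc ++ [((i : Int), pos)]
        if stop then (acc', true)
        else loopA s lsub i stop (pos.toNat + 1) acc' fuel'
    else (acc, false)

def goA (rest : List String) (lsub : List Char) (i : Nat) (stop : Bool)
    (acc : List (Int × Int)) : List (Int × Int) :=
  match rest with
  | [] => acc
  | s :: t =>
    let ls := (PySem.Str.lower s).toList
    let r := loopA ls lsub i stop 0 acc ls.length
    if r.2 then r.1 else goA t lsub (i + 1) stop r.1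

def search_substring_in_list (strings : List String) (substring : String) (stop_on_first_match : Bool) : List (Int × Int) :=
  goA strings (PySem.Str.lower substring).toList 0 stop_on_first_match []

-- ===== PORT B =====
-- _match_positions: the list comprehension `[p for p in range(len) if startswith(sub, p)]`
-- (startswith-at-pos is exact as prefix-of-drop); empty for 'up one level' strings.
def matchPositions (ls lsub : List Char) : List Nat :=
  if PySem.Chars.isIn "up one level".toList ls then []
  else (List.range ls.length).filter (fun p => PySem.Chars.startswith (ls.drop p) lsub)

-- the double comprehension over enumerate, then `[:1]` if stop_on_first_match
def search_substring_in_list_alt (strings : List String) (substring : String) (stop_on_first_match : Bool) : List (Int × Int) :=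
  let lsub := (PySem.Str.lower substring).toList
  let all_matches := (PySem.List.enumerate strings).flatMap
    (fun is => (matchPositions (PySem.Str.lower is.2).toList lsub).map (fun p => (is.1, (p : Int))))
  if stop_on_first_match then all_matches.take 1 else all_matches

-- ===== PRECONDITION & SPEC =====
def Spec_search_substring_in_list (strings : List String) (substring : String) (stop_on_first_match : Bool) (out : List (Int × Int)) : Prop := out = search_substring_in_list_alt strings substring stop_on_first_match
instance (strings : List String) (substring : String) (stop_on_first_match : Bool) (out : List (Int × Int)) : Decidable (Spec_search_substring_in_list strings substring stop_on_first_match out) := by unfold Spec_search_substring_in_list; infer_instance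

-- ===== CLAIM (what is proved, stated in full; the proofs are below) =====
def Claim_equal_search_substring_in_list : Prop := ∀ (strings : List String) (substring : String) (stop_on_first_match : Bool), Dom_search_substring_in_list strings substring stop_on_first_match → Spec_search_substring_in_list strings substring stop_on_first_match (search_substring_in_list strings substring stop_on_first_match)

-- ===== LEMMAS AND PROOFS =====

-- proof-only intermediate: A's inner loop rephrased as a scan of an explicit position list
def loopI (s lsub : List Char) (i : Nat) (stop : Bool) (positions : List Nat)
    (acc : List (Int × Int)) : List (Int × Int) × Bool :=
  match positions with
  | [] => (acc, false)
  | p :: ps =>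
    if PySem.Chars.startswith (s.drop p) lsub then
      let acc' := acc ++ [((i : Int), (p : Int))]
      if stop then (acc', true) else loopI s lsub i stop ps acc'
    else loopI s lsub i stop ps acc

-- proof-only: B's flattening written as structural recursion with a running index
def flattenM (rest : List String) (lsub : List Char) (i : Nat) : List (Int × Int) :=
  match rest with
  | [] => []
  | s :: t => (matchPositions (PySem.Str.lower s).toList lsub).map (fun p => ((i : Int), (p : Int)))
      ++ flattenM t lsub (i + 1)

theorem loopI_all_fail (s lsub : List Char) (i : Nat) (stop : Bool) (ps : List Nat)
    (acc : List (Int × Int)) (h : ∀ p ∈ ps, ¬ PySem.Chars.startswith (s.drop p) lsub) :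
    loopI s lsub i stop ps acc = (acc, false) := by
  induction ps with
  | nil => rfl
  | cons p ps ih =>
    simp only [loopI]
    rw [if_neg (h p (by simp))]
    exact ih fun q hq => h q (by simp [hq])

theorem loopI_append (s lsub : List Char) (i : Nat) (stop : Bool) (ps qs : List Nat)
    (acc : List (Int × Int)) :
    loopI s lsub i stop (ps ++ qs) acc =
      (if (loopI s lsub i stop ps acc).2 then loopI s lsub i stop ps acc
       else loopI s lsub i stop qs (loopI s lsub i stop ps acc).1) := by
  induction ps generalizing acc with
  | nil => simp [loopI]
  | cons p ps ih =>
    simp only [List.cons_append, loopI]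
    by_cases hs : PySem.Chars.startswith (s.drop p) lsub = true
    · rw [if_pos hs, if_pos hs]
      cases stop with
      | true => simp
      | false => simp only [Bool.false_eq_true, if_false]; exact ih _
    · rw [if_neg hs, if_neg hs]; exact ih _

theorem startswith_false_of_no_prefix (s lsub : List Char) (start p : Nat)
    (hle : start ≤ p)
    (hno : ¬ lsub <:+: s.drop start) :
    ¬ PySem.Chars.startswith (s.drop p) lsub = true := by
  intro hsw
  apply hno
  have hpre : lsub <+: s.drop p := (PySem.Chars.startswith_iff _ _).mp hsw
  have : s.drop p = (s.drop start).drop (p - start) := by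
    rw [List.drop_drop]; congr 1; omega
  rw [this] at hpre
  exact hpre.isInfix.trans (List.drop_suffix _ _).isInfix

theorem loopA_eq_loopI (s lsub : List Char) (i : Nat) (stop : Bool) (fuel : Nat) :
    ∀ (start : Nat) (acc : List (Int × Int)),
    PySem.Chars.isIn "up one level".toList s = false →
    s.length - start ≤ fuel →
    loopA s lsub i stop start acc fuel =
      loopI s lsub i stop (List.range' start (s.length - start)) acc := by
  induction fuel with
  | zero =>
    intro start acc _ hfuel
    have h0 : s.length - start = 0 := by omega
    simp [loopA, loopI, h0]
  | succ fuel ih =>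
    intro start acc hup hfuel
    by_cases hlt : start < s.length
    · have hks : start ≤ s.length := le_of_lt hlt
      simp only [loopA, if_pos hlt, hup, Bool.false_eq_true, or_false]
      by_cases hpos : PySem.Chars.findFrom s lsub (start : Int) none = -1
      · rw [if_pos hpos]
        rw [loopI_all_fail]
        intro p hp
        have hsp : start ≤ p := by
          rcases List.mem_range'.mp hp with ⟨j, _, rfl⟩; omega
        exact startswith_false_of_no_prefix s lsub start p hsp
          ((PySem.Chars.findFrom_natCast_eq_neg_one_iff s lsub start hks).mp hpos)
      · rw [if_neg hpos]
        obtain ⟨hge, hpre, hmin⟩ :=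
          PySem.Chars.findFrom_natCast_spec s lsub start hks hpos
        set pos := PySem.Chars.findFrom s lsub (start : Int) none with hposdef
        have hpos0 : 0 ≤ pos := le_trans (by exact_mod_cast Int.natCast_nonneg start) hge
        have hgeN : start ≤ pos.toNat := by omega
        have hPlt : pos.toNat < s.length := by
          by_cases hnil : lsub = []
          · subst hnil
            have := PySem.Chars.findFrom_natCast s [] start hks
            rw [PySem.Chars.find_nil] at this
            simp at this
            omega
          · have : s.drop pos.toNat ≠ [] := by
              intro h
              rw [h] at hpre
              exact hnil (List.prefix_nil.mp hpre)
            have := List.drop_eq_nil_iff.not.mp this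
            omega
        -- split the position range at pos
        have hsplit : List.range' start (s.length - start) =
            List.range' start (pos.toNat - start) ++
              pos.toNat :: List.range' (pos.toNat + 1) (s.length - (pos.toNat + 1)) := by
          have h1 : s.length - start = (pos.toNat - start) + (1 + (s.length - (pos.toNat + 1))) := by
            omega
          rw [h1, ← List.range'_append]
          congr 1
          have h2 : start + 1 * (pos.toNat - start) = pos.toNat := by omega
          rw [h2, Nat.add_comm 1, List.range'_succ]
        rw [hsplit, loopI_append, loopI_all_fail]
        · simp only [Bool.false_eq_true, if_false, loopI]
          rw [if_pos ((PySem.Chars.startswith_iff _ _).mpr hpre)]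
          have hcast : ((pos.toNat : Nat) : Int) = pos := Int.toNat_of_nonneg hpos0
          rw [hcast]
          cases stop with
          | true => rfl
          | false =>
            simp only [Bool.false_eq_true, if_false]
            have := ih (pos.toNat + 1) (acc ++ [((i : Int), pos)]) hup (by omega)
            rw [this]
        · intro p hp
          rcases List.mem_range'.mp hp with ⟨j, hj, rfl⟩
          intro hsw
          exact hmin (start + 1 * j) (by omega) (by omega)
            ((PySem.Chars.startswith_iff _ _).mp hsw)
    · have h0 : s.length - start = 0 := by omega
      simp [loopA, loopI, h0, hlt]

-- loopI characterised by the filtered position list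
theorem loopI_char_false (s lsub : List Char) (i : Nat) (ps : List Nat)
    (acc : List (Int × Int)) :
    loopI s lsub i false ps acc =
      (acc ++ (ps.filter (fun p => PySem.Chars.startswith (s.drop p) lsub)).map
        (fun p => ((i : Int), (p : Int))), false) := by
  induction ps generalizing acc with
  | nil => simp [loopI]
  | cons p ps ih =>
    simp only [loopI]
    by_cases hs : PySem.Chars.startswith (s.drop p) lsub = true
    · simp [hs, ih, List.append_assoc]
    · rw [if_neg hs]
      simp [hs, ih]

theorem loopI_char_true (s lsub : List Char) (i : Nat) (ps : List Nat)
    (acc : List (Int × Int)) :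
    loopI s lsub i true ps acc =
      (match ps.filter (fun p => PySem.Chars.startswith (s.drop p) lsub) with
       | [] => (acc, false)
       | q :: _ => (acc ++ [((i : Int), (q : Int))], true)) := by
  induction ps generalizing acc with
  | nil => simp [loopI]
  | cons p ps ih =>
    simp only [loopI]
    by_cases hs : PySem.Chars.startswith (s.drop p) lsub = true
    · simp [hs]
    · rw [if_neg hs]
      simp only [List.filter_cons, hs, Bool.false_eq_true, if_false]
      exact ih acc

theorem loopA_up (ls lsub : List Char) (i : Nat) (stop : Bool) (acc : List (Int × Int))
    (hup : PySem.Chars.isIn "up one level".toList ls = true) :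
    loopA ls lsub i stop 0 acc ls.length = (acc, false) := by
  cases hl : ls.length with
  | zero => rfl
  | succ n =>
    simp only [loopA, hl]
    rw [if_pos (by omega), if_pos (Or.inr hup)]

-- A's outer loop computes B's flattened matches (truncated to 1 when stopping)
theorem goA_eq_flatten (rest : List String) (lsub : List Char) (stop : Bool) :
    ∀ (i : Nat) (acc : List (Int × Int)),
    goA rest lsub i stop acc =
      (if stop then acc ++ (flattenM rest lsub i).take 1 else acc ++ flattenM rest lsub i) := by
  induction rest with
  | nil => intro i acc; simp [goA, flattenM]
  | cons s t ih =>
    intro i acc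
    simp only [goA, flattenM]
    by_cases hup : PySem.Chars.isIn "up one level".toList (PySem.Str.lower s).toList = true
    · rw [loopA_up _ _ _ _ _ hup]
      simp only [Bool.false_eq_true, if_false, matchPositions, if_pos hup]
      exact ih (i + 1) acc
    · have hup' : PySem.Chars.isIn "up one level".toList (PySem.Str.lower s).toList = false :=
        Bool.not_eq_true _ |>.mp hup
      rw [loopA_eq_loopI _ _ _ _ _ 0 acc hup' (by omega)]
      rw [Nat.sub_zero, ← List.range_eq_range']
      simp only [matchPositions, if_neg hup]
      cases stop with
      | false =>
        rw [loopI_char_false]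
        simp only [Bool.false_eq_true, if_false]
        rw [ih (i + 1)]
        simp [List.append_assoc]
      | true =>
        rw [loopI_char_true]
        cases hq : (List.range (PySem.Str.lower s).toList.length).filter
            (fun p => PySem.Chars.startswith ((PySem.Str.lower s).toList.drop p) lsub) with
        | nil =>
          simp only [Bool.false_eq_true, if_false]
          rw [ih (i + 1)]
          simp
        | cons q qs =>
          simp only [if_true]
          simp [List.take_succ_cons]

-- flattenM coincides with the enumerate-flatMap pipeline of the B port
theorem flattenM_eq_flatMap (rest : List String) (lsub : List Char) :
    ∀ (i : Nat),
    flattenM rest lsub i = (PySem.List.enumerate rest (i : Int)).flatMap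
      (fun is => (matchPositions (PySem.Str.lower is.2).toList lsub).map (fun p => (is.1, (p : Int)))) := by
  induction rest with
  | nil => intro i; simp [flattenM, PySem.List.enumerate_nil]
  | cons s t ih =>
    intro i
    simp only [flattenM, PySem.List.enumerate_cons, List.flatMap_cons]
    congr 1
    have : ((i : Int) + 1) = ((i + 1 : Nat) : Int) := by push_cast; ring
    rw [this, ← ih (i + 1)]

-- ===== VERDICT (by name: the statement is the Claim_ definition above) =====
theorem search_substring_in_list_spec : Claim_equal_search_substring_in_list := by
  intro strings substring stop _
  unfold Spec_search_substring_in_list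
  simp only [search_substring_in_list, search_substring_in_list_alt]
  rw [goA_eq_flatten]
  have h0 : ∀ z : Int, z = ((0 : Nat) : Int) → PySem.List.enumerate strings z
      = PySem.List.enumerate strings ((0 : Nat) : Int) := by intro z hz; rw [hz]
  rw [h0 _ (by norm_num), ← flattenM_eq_flatMap]
  cases stop <;> simp
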